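-- pv_equiv track=rewrite | github.com/predictivelabsai/altsignals | utils/chat_interface.py | parse
-- ===== SOURCE A (Python) =====
-- def parse(text: str) -> str:
--     """Parse the LLM output and extract meaningful response."""
--     # Remove SQL query from response if present
--     lines = text.strip().split('\n')
--
--     # Look for the actual answer after SQL execution
--     answer_started = False
--     answer_lines = []
--
--     for line in lines:
--         if 'Answer:' in line or answer_started:
--             answer_started = True
--             if 'Answer:' in line:
--                 answer_lines.append(line.replace('Answer:', '').strip())
--             else:
--                 answer_lines.append(line.strip())
--
--     if answer_lines:
--         return ' '.join(answer_lines)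
--
--     # Fallback: return the last non-empty line
--     for line in reversed(lines):
--         if line.strip() and not line.strip().startswith('SELECT'):
--             return line.strip()
--
--     return text.strip()
-- ===== SOURCE B (Python) =====
-- def parse(text: str) -> str:
--     """Parse the LLM output and extract meaningful response."""
--     lines = text.strip().split('\n')
--     suffix = []        # cleaned lines from the current position to the end
--     answer = None      # cleaned lines from the first 'Answer:' line onward, if any
--     fallback = None    # last non-empty line not starting with 'SELECT'
--     for line in reversed(lines):
--         s = line.strip()
--         if 'Answer:' in line:
--             suffix = [line.replace('Answer:', '').strip()] + suffix
--             answer = suffix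
--         else:
--             suffix = [s] + suffix
--         if fallback is None and s and not s.startswith('SELECT'):
--             fallback = s
--     if answer is not None:
--         return ' '.join(answer)
--     return fallback if fallback is not None else text.strip()
-- ===== Notes on version B (the rewrite author's own statement) =====
-- stated objective: alternative
-- what changed: Replaced A's forward flag-accumulator loop plus separate reverse fallback loop by one single reverse pass that builds the cleaned suffix back-to-front by prepending, snapshots it at each marker line (the final snapshot is the first marker's suffix), and captures the fallback line in the same pass.
import Mathlib
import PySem

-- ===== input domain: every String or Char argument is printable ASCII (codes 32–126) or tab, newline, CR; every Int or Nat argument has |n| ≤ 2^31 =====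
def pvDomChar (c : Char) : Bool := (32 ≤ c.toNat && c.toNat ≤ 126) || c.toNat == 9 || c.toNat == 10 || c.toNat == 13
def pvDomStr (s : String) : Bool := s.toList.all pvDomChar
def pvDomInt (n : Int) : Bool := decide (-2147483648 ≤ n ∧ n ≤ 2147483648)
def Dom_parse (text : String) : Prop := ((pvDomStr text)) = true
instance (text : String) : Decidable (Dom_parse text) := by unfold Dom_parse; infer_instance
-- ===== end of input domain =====

-- B replaces A's forward flag-accumulator loop plus separate reverse fallback loop by ONE
-- reverse pass building the cleaned suffix back-to-front; objective: alternative.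

-- ===== PORT A =====
-- A's loop body over the state (answer_started, answer_lines)
def parseStep (st : Bool × List String) (line : String) : Bool × List String :=
  if PySem.Str.isIn "Answer:" line || st.1 then
    (true, st.2 ++ [if PySem.Str.isIn "Answer:" line then
                      PySem.Str.strip (PySem.Str.replace line "Answer:" "")
                    else PySem.Str.strip line])
  else st

-- the fallback predicate: line.strip() truthy and not startswith 'SELECT'
def parseKeep (line : String) : Bool :=
  !(PySem.Str.strip line == "") && !(PySem.Str.startswith (PySem.Str.strip line) "SELECT")

def parse (text : String) : String :=
  let lines := (PySem.Str.split? (PySem.Str.strip text) "\n").getD []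
  let st := lines.foldl parseStep (false, [])
  if !st.2.isEmpty then
    PySem.Str.join " " st.2
  else
    match lines.reverse.find? parseKeep with
    | some line => PySem.Str.strip line
    | none => PySem.Str.strip text

-- ===== PORT B =====
-- B's reverse-pass body over the state (answer, suffix, fallback)
def parseAltStep (st : Option (List String) × List String × Option String) (line : String) :
    Option (List String) × List String × Option String :=
  let s := PySem.Str.strip line
  if PySem.Str.isIn "Answer:" line then
    let suffix := PySem.Str.strip (PySem.Str.replace line "Answer:" "") :: st.2.1
    (some suffix, suffix,
      match st.2.2 with
      | some f => some f
      | none => if !(s == "") && !(PySem.Str.startswith s "SELECT") then some s else none)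
  else
    let suffix := s :: st.2.1
    (st.1, suffix,
      match st.2.2 with
      | some f => some f
      | none => if !(s == "") && !(PySem.Str.startswith s "SELECT") then some s else none)

def parse_alt (text : String) : String :=
  let lines := (PySem.Str.split? (PySem.Str.strip text) "\n").getD []
  let st := lines.reverse.foldl parseAltStep (none, [], none)
  match st.1 with
  | some ans => PySem.Str.join " " ans
  | none =>
    match st.2.2 with
    | some f => f
    | none => PySem.Str.strip text

-- ===== PRECONDITION & SPEC =====
def Spec_parse (text : String) (out : String) : Prop := out = parse_alt text
instance (text : String) (out : String) : Decidable (Spec_parse text out) := by unfold Spec_parse; infer_instance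

-- ===== CLAIM =====
def Claim_equal_parse : Prop := ∀ (text : String), Dom_parse text → Spec_parse text (parse text)

-- ===== LEMMAS AND PROOFS =====

-- proof-side line cleaner (what both loops do to one line)
def parseClean (line : String) : String :=
  if PySem.Str.isIn "Answer:" line then
    PySem.Str.strip (PySem.Str.replace line "Answer:" "")
  else
    PySem.Str.strip line

-- once started, A's loop appends the cleaned remainder of the list
theorem foldl_parseStep_started (ls : List String) (acc : List String) :
    ls.foldl parseStep (true, acc) = (true, acc ++ ls.map parseClean) := by
  induction ls generalizing acc with
  | nil => simp
  | cons a l ih => simp [List.foldl_cons, parseStep, parseClean, ih]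

-- A's whole loop, characterised by the index of the first 'Answer:' line
theorem foldl_parseStep_eq (ls : List String) :
    ls.foldl parseStep (false, []) =
      match ls.findIdx? (fun line => PySem.Str.isIn "Answer:" line) with
      | some i => (true, (ls.drop i).map parseClean)
      | none => (false, ([] : List String)) := by
  induction ls with
  | nil => simp
  | cons a l ih =>
      rw [List.foldl_cons]
      by_cases h : PySem.Str.isIn "Answer:" a = true
      · have hc : PySem.Chars.isIn ['A','n','s','w','e','r',':'] a.toList = true := by
          simpa [PySem.Str.isIn] using h
        have hstep : parseStep (false, []) a = (true, [parseClean a]) := by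
          simp [parseStep, parseClean, hc]
        rw [hstep, foldl_parseStep_started, List.findIdx?_cons, if_pos h]
        simp
      · have hb : PySem.Str.isIn "Answer:" a = false := by
          revert h; cases PySem.Str.isIn "Answer:" a <;> simp
        have hc : PySem.Chars.isIn ['A','n','s','w','e','r',':'] a.toList = false := by
          simpa [PySem.Str.isIn] using hb
        have hstep : parseStep (false, []) a = (false, []) := by
          simp [parseStep, hc]
        rw [hstep, ih, List.findIdx?_cons, if_neg (by simp [hc])]
        cases hf : l.findIdx? (fun line => PySem.Str.isIn "Answer:" line) <;> simp

-- B's whole reverse pass, characterised in the same terms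
theorem foldl_parseAltStep_eq (ls : List String) :
    ls.reverse.foldl parseAltStep (none, [], none) =
      ((ls.findIdx? (fun line => PySem.Str.isIn "Answer:" line)).map
          (fun i => (ls.drop i).map parseClean),
        ls.map parseClean,
        (ls.reverse.find? parseKeep).map PySem.Str.strip) := by
  rw [List.foldl_reverse]
  induction ls with
  | nil => simp
  | cons a l ih =>
      rw [List.foldr_cons, ih]
      have hfind : ((a :: l).reverse.find? parseKeep).map PySem.Str.strip =
          match (l.reverse.find? parseKeep).map PySem.Str.strip with
          | some f => some f
          | none => if parseKeep a then some (PySem.Str.strip a) else none := by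
        rw [List.reverse_cons, List.find?_append]
        cases l.reverse.find? parseKeep with
        | some f => simp
        | none => cases hk : parseKeep a <;> simp [hk]
      by_cases h : PySem.Str.isIn "Answer:" a = true
      · have hc : PySem.Chars.isIn ['A','n','s','w','e','r',':'] a.toList = true := by
          simpa [PySem.Str.isIn] using h
        simp only [parseAltStep, h, if_pos, List.findIdx?_cons]
        rw [hfind]
        simp [parseClean, parseKeep, hc]
      · have hb : PySem.Str.isIn "Answer:" a = false := by
          revert h; cases PySem.Str.isIn "Answer:" a <;> simp
        have hc : PySem.Chars.isIn ['A','n','s','w','e','r',':'] a.toList = false := by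
          simpa [PySem.Str.isIn] using hb
        simp only [parseAltStep, hb, Bool.false_eq_true, if_false, List.findIdx?_cons]
        rw [hfind]
        cases hf : l.findIdx? (fun line => PySem.Str.isIn "Answer:" line) <;>
          simp [parseClean, parseKeep, hc]

theorem findIdx?_lt_length (p : String → Bool) (l : List String) (i : Nat)
    (h : l.findIdx? p = some i) : i < l.length := by
  have := List.findIdx?_eq_some_iff_findIdx_eq.mp h
  omega

-- ===== VERDICT =====
theorem parse_spec : Claim_equal_parse := by
  intro text _
  unfold Spec_parse parse parse_alt
  simp only []
  rw [foldl_parseStep_eq, foldl_parseAltStep_eq]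
  cases hf : ((PySem.Str.split? (PySem.Str.strip text) "\n").getD []).findIdx?
      (fun line => PySem.Str.isIn "Answer:" line) with
  | none =>
      simp only [Option.map_none]
      cases ((PySem.Str.split? (PySem.Str.strip text) "\n").getD []).reverse.find? parseKeep <;>
        simp
  | some i =>
      have hlt := findIdx?_lt_length _ _ _ hf
      simp only [Option.map_some]
      rw [if_pos]
      simp [List.drop_eq_nil_iff]
      omega
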